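-- pv_equiv track=rewrite | github.com/DLatreyte/hugo-site-source | content/premieres-nsi/chap-01/1ère Spé NSI/Site statique/chap-13/analyse_frequentielle.py | suppression_blancs
-- ===== SOURCE A (Python) =====
-- from typing import List, Dict, Sequence
-- import string
--
-- def suppression_blancs(liste_car: List[str]) -> List[str]:
--     """
--     Supprime tous les caractères invisibles dans la liste.
--     """
--     i = 0
--     while i < len(liste_car):
--         if liste_car[i] in string.whitespace:
--             del liste_car[i]
--             continue
--         i += 1
--     return liste_car
-- ===== SOURCE B (Python) =====
-- import string
-- from typing import List
--
-- def suppression_blancs(liste_car: List[str]) -> List[str]: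
--     """
--     Supprime tous les caracteres invisibles dans la liste.
--     Two-pointer in-place compaction: overwrite kept elements forward, then truncate.
--     """
--     j = 0
--     for i in range(len(liste_car)):
--         x = liste_car[i]
--         if x not in string.whitespace:
--             liste_car[j] = x
--             j += 1
--     del liste_car[j:]
--     return liste_car
-- ===== Notes on version B (the rewrite author's own statement) =====
-- stated objective: alternative
-- what changed: A deletes whitespace elements one at a time with `del liste_car[i]` (each deletion shifts the tail); B is a two-pointer in-place compaction that overwrites kept elements forward with a write pointer and truncates the leftover tail once at the end.
import Mathlib
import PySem

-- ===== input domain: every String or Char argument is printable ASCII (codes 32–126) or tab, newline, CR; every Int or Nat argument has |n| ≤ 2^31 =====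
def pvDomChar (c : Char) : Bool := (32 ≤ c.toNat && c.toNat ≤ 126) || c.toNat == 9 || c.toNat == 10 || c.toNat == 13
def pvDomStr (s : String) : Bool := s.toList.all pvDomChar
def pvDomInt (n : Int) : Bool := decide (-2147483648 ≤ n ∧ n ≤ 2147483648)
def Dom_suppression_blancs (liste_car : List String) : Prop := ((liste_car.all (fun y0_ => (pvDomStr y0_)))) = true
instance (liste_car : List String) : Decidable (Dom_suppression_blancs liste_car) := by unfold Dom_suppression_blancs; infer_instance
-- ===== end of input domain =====

-- B replaces A's delete-and-shift while loop by a two-pointer in-place compaction (overwrite kept elements forward, then truncate the tail); return value proved equal. Both A and B mutate the argument list in place in Python; the equivalence proved here is about the returned list.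


-- string.whitespace (ASCII); Python's `x in string.whitespace` is a substring test
def pvWhitespace : String := " \t\n\r\x0b\x0c"

-- ===== PORT A =====
-- A's while loop: index i over the current list, in-place `del liste_car[i]` on whitespace
def pvGoA (l : List String) (i : Nat) : List String :=
  if h : i < l.length then
    if PySem.Str.isIn l[i] pvWhitespace then
      pvGoA (l.eraseIdx i) i
    else
      pvGoA l (i + 1)
  else l
termination_by l.length - i
decreasing_by
  · simp [List.length_eraseIdx, h]; omega
  · omega

def suppression_blancs (liste_car : List String) : List String := pvGoA liste_car 0

-- ===== PORT B =====
-- one step of B's for loop: read liste_car[i]; if kept, write it at position j and advance j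
def pvStepB (st : List String × Nat) (i : Nat) : List String × Nat :=
  let x := st.1.getD i ""
  if PySem.Str.isIn x pvWhitespace then st
  else (st.1.set st.2 x, st.2 + 1)

def suppression_blancs_alt (liste_car : List String) : List String :=
  let st := (List.range liste_car.length).foldl pvStepB (liste_car, 0)
  st.1.take st.2   -- del liste_car[j:]

-- ===== PRECONDITION & SPEC =====
def Spec_suppression_blancs (liste_car : List String) (out : List String) : Prop := out = suppression_blancs_alt liste_car
instance (liste_car : List String) (out : List String) : Decidable (Spec_suppression_blancs liste_car out) := by unfold Spec_suppression_blancs; infer_instance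

-- ===== CLAIM (what is proved, stated in full; the proofs are below) =====
def Claim_equal_suppression_blancs : Prop := ∀ (liste_car : List String), Dom_suppression_blancs liste_car → Spec_suppression_blancs liste_car (suppression_blancs liste_car)

-- ===== LEMMAS AND PROOFS =====

def pvKeep (s : String) : Bool := ! PySem.Str.isIn s pvWhitespace

-- A's loop keeps the already-inspected prefix and filters the rest
theorem pvGoA_eq_filter (l : List String) (i : Nat) :
    pvGoA l i = l.take i ++ (l.drop i).filter pvKeep := by
  induction l, i using pvGoA.induct with
  | case1 l i h hw ih =>
    rw [pvGoA, dif_pos h, if_pos hw]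
    rw [ih, List.eraseIdx_eq_take_drop_succ]
    rw [List.drop_eq_getElem_cons h, List.filter_cons]
    have hk : pvKeep l[i] = false := by simp only [pvKeep, hw, Bool.not_true]
    simp [hk, List.length_take, Nat.min_eq_left (Nat.le_of_lt h)]
  | case2 l i h hw ih =>
    rw [pvGoA, dif_pos h, if_neg hw]
    rw [ih, List.drop_eq_getElem_cons h, List.filter_cons]
    have hk : pvKeep l[i] = true := by simp only [pvKeep, Bool.not_eq_true']; exact Bool.not_eq_true _ ▸ (by simpa using hw)
    rw [hk, List.take_add_one, List.getElem?_eq_getElem h]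
    simp only [Option.toList_some, List.append_assoc, List.singleton_append, if_true]
  | case3 l i h =>
    rw [pvGoA, dif_neg h]
    simp [List.take_of_length_le (Nat.le_of_not_lt h), List.drop_of_length_le (Nat.le_of_not_lt h)]

-- B's loop invariant: after i steps the write pointer j bounds the compacted prefix,
-- which is the filter of the first i elements, and positions ≥ i are untouched
theorem pvB_inv (l : List String) (i : Nat) (hi : i ≤ l.length) :
    ((List.range i).foldl pvStepB (l, 0)).2 ≤ i ∧
    ((List.range i).foldl pvStepB (l, 0)).1.length = l.length ∧
    ((List.range i).foldl pvStepB (l, 0)).1.take ((List.range i).foldl pvStepB (l, 0)).2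
      = (l.take i).filter pvKeep ∧
    ((List.range i).foldl pvStepB (l, 0)).1.drop i = l.drop i := by
  induction i with
  | zero => simp
  | succ i ih =>
    obtain ⟨hj, hlen, htake, hdrop⟩ := ih (Nat.le_of_succ_le hi)
    have hil : i < l.length := hi
    rw [List.range_succ, List.foldl_append, List.foldl_cons, List.foldl_nil]
    set st := (List.range i).foldl pvStepB (l, 0) with hst
    have hx : st.1.getD i "" = l[i] := by
      have h1 : st.1[i]? = l[i]? := by
        have := congrArg (fun t => t[0]?) hdrop
        simpa [List.getElem?_drop] using this
      rw [List.getD_eq_getElem?_getD, h1, List.getElem?_eq_getElem hil]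
      rfl
    by_cases hw : PySem.Str.isIn (st.1.getD i "") pvWhitespace = true
    · rw [pvStepB]
      simp only [hw, if_pos]
      have hkf : pvKeep l[i] = false := by simp only [pvKeep]; rw [← hx, hw]; rfl
      refine ⟨Nat.le_succ_of_le hj, hlen, ?_, ?_⟩
      · rw [htake, List.take_add_one, List.getElem?_eq_getElem hil, List.filter_append]
        simp [hkf]
      · have h2 : st.1.drop (i+1) = (st.1.drop i).drop 1 := by
          rw [List.drop_drop]
        rw [h2, hdrop, List.drop_drop]
    · rw [pvStepB]
      simp only [hw, Bool.false_eq_true, if_false]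
      have hjl : st.2 < st.1.length := by omega
      have hkt : pvKeep l[i] = true := by
        simp only [pvKeep]; rw [← hx]
        simp only [Bool.not_eq_true']
        exact Bool.not_eq_true _ ▸ (by simpa using hw)
      refine ⟨by omega, by simp [hlen], ?_, ?_⟩
      · rw [List.take_add_one, List.take_set_of_le (Nat.le_refl _),
            List.getElem?_set_self hjl, htake, hx,
            List.take_add_one, List.getElem?_eq_getElem hil, List.filter_append]
        simp [hkt]
      · rw [List.drop_set_of_lt (by omega)]
        have h2 : st.1.drop (i+1) = (st.1.drop i).drop 1 := by rw [List.drop_drop]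
        rw [h2, hdrop, List.drop_drop]

-- ===== VERDICT (by name: the statement is the Claim_ definition above) =====
theorem suppression_blancs_spec : Claim_equal_suppression_blancs := by
  intro l _
  unfold Spec_suppression_blancs suppression_blancs suppression_blancs_alt
  have hA := pvGoA_eq_filter l 0
  have hB := pvB_inv l l.length le_rfl
  simp only [List.take_length] at hB
  simp only [List.drop_zero, List.take_zero, List.nil_append] at hA
  rw [hA, ← hB.2.2.1]
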